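-- pv_equiv track=rewrite | github.com/JianHengHin0831/staff_identification_problem | 08_final_report.py | frames_to_intervals
-- ===== SOURCE A (Python) =====
-- def frames_to_intervals(frame_list, max_gap=1):
--     """
--     将一个离散的、排序好的帧号列表转换成连续的时间段。
--     """
--     if not frame_list:
--         return []
--
--     intervals = []
--     start_of_interval = frame_list[0]
--     for i in range(1, len(frame_list)):
--         if frame_list[i] - frame_list[i-1] > max_gap:
--             intervals.append([start_of_interval, frame_list[i-1]])
--             start_of_interval = frame_list[i]
--     intervals.append([start_of_interval, frame_list[-1]])
--     return intervals
-- ===== SOURCE B (Python) =====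
-- def frames_to_intervals(frame_list, max_gap=1):
--     if not frame_list:
--         return []
--     n = len(frame_list)
--     breaks = [i for i in range(1, n) if frame_list[i] - frame_list[i - 1] > max_gap]
--     bounds = [0] + breaks + [n]
--     groups = [frame_list[lo:hi] for lo, hi in zip(bounds, bounds[1:])]
--     return [[g[0], g[-1]] for g in groups]
-- ===== Notes on version B (the rewrite author's own statement) =====
-- stated objective: alternative
-- what changed: Instead of one stateful pass carrying a running interval start, B first computes the break indices by comprehension, prepends zero and appends the length to form the boundary list, slices the list into contiguous groups via zip of consecutive bounds, and maps each group to its endpoints.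
import Mathlib
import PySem

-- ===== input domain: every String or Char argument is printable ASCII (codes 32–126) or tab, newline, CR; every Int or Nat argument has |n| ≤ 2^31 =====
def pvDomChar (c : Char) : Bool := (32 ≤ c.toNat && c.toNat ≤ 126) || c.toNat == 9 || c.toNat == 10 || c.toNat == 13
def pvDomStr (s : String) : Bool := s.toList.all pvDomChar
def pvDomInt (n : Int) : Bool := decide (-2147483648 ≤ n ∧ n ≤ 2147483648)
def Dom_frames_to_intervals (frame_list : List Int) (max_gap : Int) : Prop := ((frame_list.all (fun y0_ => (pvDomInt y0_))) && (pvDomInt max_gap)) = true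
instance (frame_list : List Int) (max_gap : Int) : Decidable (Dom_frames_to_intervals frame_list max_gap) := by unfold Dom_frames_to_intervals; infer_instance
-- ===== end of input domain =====

-- B replaces A's single stateful pass (running interval start) by: break indices, then boundary list, then slicing into groups, then endpoints; same cost, different decomposition.

-- shared sub-expression `frame_list[i] - frame_list[i-1] > max_gap` (textually identical in both Pythons)
def pvBrk (xs : List Int) (g : Int) (i : Int) : Bool :=
  decide (PySem.List.pyGetD xs i 0 - PySem.List.pyGetD xs (i - 1) 0 > g)

-- ===== PORT A =====
-- loop body of A's for-loop: state = (intervals, start_of_interval)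
def pvStepA (xs : List Int) (g : Int) (st : List (List Int) × Int) (i : Int) : List (List Int) × Int :=
  if pvBrk xs g i then
    (st.1 ++ [[st.2, PySem.List.pyGetD xs (i - 1) 0]], PySem.List.pyGetD xs i 0)
  else st

def frames_to_intervals (frame_list : List Int) (max_gap : Int) : List (List Int) :=
  if frame_list = [] then []
  else
    let st := (PySem.List.pyRange 1 (frame_list.length : Int) 1).foldl
      (pvStepA frame_list max_gap) ([], PySem.List.pyGetD frame_list 0 0)
    st.1 ++ [[st.2, PySem.List.pyGetD frame_list (-1) 0]]

-- ===== PORT B =====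
def frames_to_intervals_alt (frame_list : List Int) (max_gap : Int) : List (List Int) :=
  if frame_list = [] then []
  else
    let n : Int := frame_list.length
    let breaks := (PySem.List.pyRange 1 n 1).filter (pvBrk frame_list max_gap)
    let bounds := (0 : Int) :: (breaks ++ [n])
    let groups := (bounds.zip bounds.tail).map
      (fun p => PySem.List.slice frame_list (some p.1) (some p.2))
    groups.map (fun gr => [PySem.List.pyGetD gr 0 0, PySem.List.pyGetD gr (-1) 0])

-- ===== PRECONDITION & SPEC =====
def Spec_frames_to_intervals (frame_list : List Int) (max_gap : Int) (out : List (List Int)) : Prop := out = frames_to_intervals_alt frame_list max_gap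
instance (frame_list : List Int) (max_gap : Int) (out : List (List Int)) : Decidable (Spec_frames_to_intervals frame_list max_gap out) := by unfold Spec_frames_to_intervals; infer_instance

-- ===== CLAIM (what is proved, stated in full; the proofs are below) =====
def Claim_equal_frames_to_intervals : Prop := ∀ (frame_list : List Int) (max_gap : Int), Dom_frames_to_intervals frame_list max_gap → Spec_frames_to_intervals frame_list max_gap (frames_to_intervals frame_list max_gap)

-- ===== LEMMAS AND PROOFS =====

-- common shape of both results: intervals determined by the break-index list, given the
-- current interval start s and the overall last frame lastv
def pvH (xs : List Int) (lastv : Int) : List Int → Int → List (List Int)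
  | [], s => [[s, lastv]]
  | i :: bl, s => [s, PySem.List.pyGetD xs (i - 1) 0] :: pvH xs lastv bl (PySem.List.pyGetD xs i 0)

lemma pvPull (xs : List Int) (g : Int) : ∀ (is : List Int) (acc : List (List Int)) (s : Int),
    is.foldl (pvStepA xs g) (acc, s)
      = (acc ++ (is.foldl (pvStepA xs g) ([], s)).1, (is.foldl (pvStepA xs g) ([], s)).2) := by
  intro is
  induction is with
  | nil => intro acc s; simp
  | cons i is ih =>
    intro acc s
    simp only [List.foldl_cons, pvStepA]
    by_cases h : pvBrk xs g i
    · simp only [if_pos h]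
      rw [ih (acc ++ [[s, PySem.List.pyGetD xs (i - 1) 0]]) (PySem.List.pyGetD xs i 0),
          ih ([] ++ [[s, PySem.List.pyGetD xs (i - 1) 0]]) (PySem.List.pyGetD xs i 0)]
      simp
    · simp only [if_neg h]
      exact ih acc s

lemma pvL1 (xs : List Int) (g lastv : Int) : ∀ (is : List Int) (s : Int),
    (is.foldl (pvStepA xs g) ([], s)).1 ++ [[(is.foldl (pvStepA xs g) ([], s)).2, lastv]]
      = pvH xs lastv (is.filter (pvBrk xs g)) s := by
  intro is
  induction is with
  | nil => intro s; simp [pvH]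
  | cons i is ih =>
    intro s
    simp only [List.foldl_cons, List.filter_cons, pvStepA]
    by_cases h : pvBrk xs g i
    · simp only [h, if_true]
      rw [pvPull xs g is ([] ++ [[s, PySem.List.pyGetD xs (i - 1) 0]]) (PySem.List.pyGetD xs i 0)]
      simp [pvH, ih]
    · simp only [if_neg h, Bool.not_eq_true] at *
      simp [ih]

-- endpoints of a nonempty in-range slice
lemma pvSliceEnds (xs : List Int) (lo hi : Int) (h0 : 0 ≤ lo) (hlt : lo < hi)
    (hle : hi ≤ (xs.length : Int)) :
    [PySem.List.pyGetD (PySem.List.slice xs (some lo) (some hi)) 0 0,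
     PySem.List.pyGetD (PySem.List.slice xs (some lo) (some hi)) (-1) 0]
      = [PySem.List.pyGetD xs lo 0, PySem.List.pyGetD xs (hi - 1) 0] := by
  have hsl : PySem.List.slice xs (some lo) (some hi)
      = List.take (hi.toNat - lo.toNat) (List.drop lo.toNat xs) :=
    PySem.List.slice_toNat xs h0 (by omega)
  have hlen : (List.take (hi.toNat - lo.toNat) (List.drop lo.toNat xs)).length
      = hi.toNat - lo.toNat := by simp; omega
  have hne : List.take (hi.toNat - lo.toNat) (List.drop lo.toNat xs) ≠ [] := by
    intro hcon
    have := congrArg List.length hcon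
    rw [hlen] at this
    simp at this
    omega
  rw [hsl, PySem.List.pyGetD_zero, PySem.List.pyGetD_neg_one _ 0 hne,
      PySem.List.pyGetD_eq_getElem xs 0 h0 (by omega),
      PySem.List.pyGetD_eq_getElem xs 0 (by omega) (by omega),
      List.getLast_eq_getElem, List.getD_eq_getElem _ _ (by omega)]
  simp only [List.getElem_take, List.getElem_drop, hlen, List.cons.injEq, and_true]
  constructor <;> (congr 1 <;> omega)

lemma pvLastIdx (xs : List Int) (hne : xs ≠ []) :
    PySem.List.pyGetD xs ((xs.length : Int) - 1) 0 = PySem.List.pyGetD xs (-1) 0 := by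
  have hl : 0 < xs.length := List.length_pos_iff.mpr hne
  rw [PySem.List.pyGetD_neg_one _ 0 hne,
      PySem.List.pyGetD_eq_getElem xs 0 (by omega) (by omega),
      List.getLast_eq_getElem]
  congr 1; omega

lemma pvL2 (xs : List Int) (hne : xs ≠ []) : ∀ (bl : List Int) (c : Int), 0 ≤ c →
    List.Pairwise (· < ·) (c :: bl) → (∀ b ∈ bl, b < (xs.length : Int)) →
    c < (xs.length : Int) →
    ((c :: (bl ++ [(xs.length : Int)])).zip (bl ++ [(xs.length : Int)])).map
        (fun p => [PySem.List.pyGetD (PySem.List.slice xs (some p.1) (some p.2)) 0 0,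
                   PySem.List.pyGetD (PySem.List.slice xs (some p.1) (some p.2)) (-1) 0])
      = pvH xs (PySem.List.pyGetD xs (-1) 0) bl (PySem.List.pyGetD xs c 0) := by
  intro bl
  induction bl with
  | nil =>
    intro c h0 _ _ hcn
    simp only [List.nil_append, List.zip_cons_cons, List.zip_nil_right, List.map_cons,
      List.map_nil, pvH]
    rw [pvSliceEnds xs c (xs.length : Int) h0 hcn (le_refl _), pvLastIdx xs hne]
  | cons b bl ih =>
    intro c h0 hpw hub hcn
    have hcb : c < b := (List.pairwise_cons.mp hpw).1 b (by simp)
    have hbn : b < (xs.length : Int) := hub b (by simp)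
    simp only [List.cons_append, List.zip_cons_cons, List.map_cons, pvH]
    rw [pvSliceEnds xs c b h0 hcb (by omega)]
    rw [ih b (by omega) (List.pairwise_cons.mp hpw).2 (fun x hx => hub x (by simp [hx])) hbn]

-- ===== VERDICT (by name: the statement is the Claim_ definition above) =====
theorem frames_to_intervals_spec : Claim_equal_frames_to_intervals := by
  intro xs g _
  unfold Spec_frames_to_intervals frames_to_intervals frames_to_intervals_alt
  by_cases h : xs = []
  · simp [h]
  · simp only [if_neg h, List.tail_cons, List.map_map]
    rw [pvL1 xs g (PySem.List.pyGetD xs (-1) 0) (PySem.List.pyRange 1 (xs.length : Int) 1)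
        (PySem.List.pyGetD xs 0 0)]
    have hl : 0 < xs.length := List.length_pos_iff.mpr h
    have hpw : List.Pairwise (· < ·)
        ((0 : Int) :: (PySem.List.pyRange 1 (xs.length : Int) 1).filter (pvBrk xs g)) := by
      rw [List.pairwise_cons]
      refine ⟨fun b hb => ?_, List.Pairwise.filter _ (PySem.List.pairwise_lt_pyRange_one 1 (xs.length : Int))⟩
      have := PySem.List.mem_pyRange_one.mp (List.mem_of_mem_filter hb)
      omega
    have hub : ∀ b ∈ (PySem.List.pyRange 1 (xs.length : Int) 1).filter (pvBrk xs g),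
        b < (xs.length : Int) :=
      fun b hb => (PySem.List.mem_pyRange_one.mp (List.mem_of_mem_filter hb)).2
    rw [← pvL2 xs h ((PySem.List.pyRange 1 (xs.length : Int) 1).filter (pvBrk xs g)) 0
        (le_refl 0) hpw hub (by exact_mod_cast hl)]
    simp [Function.comp]
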